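-- pv_equiv track=rewrite | github.com/iamnithyaramesh/Advanced-Data-Structures | Lab_codes_ver2/adsa_lab/hamiltonian.py | eliminate_cyclic_permutations
-- ===== SOURCE A (Python) =====
-- def normalize(lst):
--     """Rotate the list to its smallest lexicographical form."""
--     return min(lst[i:] + lst[:i] for i in range(len(lst)))
--
-- def eliminate_cyclic_permutations(lists):
--     """Eliminate cyclic permutations from a list of lists."""
--     normalized_set = set()
--     unique_lists = []
--
--     for lst in lists:
--         norm = tuple(normalize(lst))
--         if norm not in normalized_set:
--             normalized_set.add(norm)
--             unique_lists.append(lst)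
--
--
--     return unique_lists
-- ===== SOURCE B (Python) =====
-- def _is_rotation(a, b):
--     """True iff b is a cyclic rotation of a, found by scanning a doubled copy of a."""
--     n = len(a)
--     if n != len(b):
--         return False
--     doubled = a + a
--     return any(doubled[i:i + n] == b for i in range(n))
--
-- def eliminate_cyclic_permutations(lists):
--     """Eliminate cyclic permutations from a list of lists."""
--     kept = []  # pairs (sum of the list, the list) for the representatives kept so far
--     for lst in lists:
--         s = sum(lst)
--         if not any(ks == s and _is_rotation(k, lst) for ks, k in kept):
--             kept.append((s, lst))
--     return [k for _, k in kept]
-- ===== Notes on version B (the rewrite author's own statement) =====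
-- stated objective: alternative
-- what changed: B computes no canonical rotation at all: instead of A's normalise-each-list-to-its-minimal-rotation-and-hash-into-a-set, B keeps a list of representatives and tests each incoming list directly for being a cyclic rotation of an already-kept one (substring scan of a doubled copy), guarded by a precomputed element-sum as a constant-time prefilter, so A's O(n^2) rotation materialisation per list is replaced by mostly O(1) sum comparisons; Pre_ excludes inputs containing an empty inner list, on which A raises ValueError (min of an empty generator).
import Mathlib
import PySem

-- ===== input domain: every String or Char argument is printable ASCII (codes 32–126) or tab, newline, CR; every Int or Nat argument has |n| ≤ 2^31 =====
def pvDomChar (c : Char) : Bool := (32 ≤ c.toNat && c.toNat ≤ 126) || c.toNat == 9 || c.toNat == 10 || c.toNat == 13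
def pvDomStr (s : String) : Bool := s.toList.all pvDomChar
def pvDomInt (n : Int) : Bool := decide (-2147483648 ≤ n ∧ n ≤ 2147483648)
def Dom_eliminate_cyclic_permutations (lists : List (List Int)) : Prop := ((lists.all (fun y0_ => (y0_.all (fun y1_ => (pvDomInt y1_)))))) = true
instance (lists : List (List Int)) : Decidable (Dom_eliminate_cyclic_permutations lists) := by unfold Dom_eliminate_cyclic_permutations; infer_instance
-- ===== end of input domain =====

-- B drops A's canonical-rotation key entirely: instead of normalising every list to its minimal
-- rotation and hashing it into a set, B keeps the representatives seen so far and tests each new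
-- list directly for being a cyclic rotation of a kept one (scan of a doubled copy, with the
-- element-sum precomputed as a cheap prefilter); objective: alternative algorithm, not faster.


-- ===== PORT A =====
-- normalize(lst) = min(lst[i:] + lst[:i] for i in range(len(lst))); min() of an empty
-- generator raises ValueError — Pre_ excludes that; the .getD [] is unreachable inside Pre_.
def pvNormalize (lst : List Int) : List Int :=
  (PySem.List.min?
    ((PySem.List.pyRange 0 (PySem.List.len lst) 1).map
      (fun i => PySem.List.slice lst (some i) none ++ PySem.List.slice lst none (some i)))
    (fun x => x)).getD []

def eliminate_cyclic_permutations (lists : List (List Int)) : List (List Int) :=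
  (lists.foldl
    (fun (st : PySem.Set (List Int) × List (List Int)) lst =>
      let norm := pvNormalize lst
      if PySem.Set.contains st.1 norm then st
      else (PySem.Set.add st.1 norm, st.2 ++ [lst]))
    (PySem.Set.empty, [])).2

-- ===== PORT B =====
-- _is_rotation(a, b): b is a cyclic rotation of a, found by scanning a doubled copy of a
def pvIsRotation (a b : List Int) : Bool :=
  let n : Int := PySem.List.len a
  if n ≠ PySem.List.len b then false
  else
    let doubled := a ++ a
    (PySem.List.pyRange 0 n 1).any fun i =>
      PySem.List.slice doubled (some i) (some (i + n)) == b

def eliminate_cyclic_permutations_alt (lists : List (List Int)) : List (List Int) :=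
  (lists.foldl
    (fun (kept : List (Int × List Int)) lst =>
      let s : Int := lst.sum
      if kept.any (fun p => p.1 == s && pvIsRotation p.2 lst) then kept
      else kept ++ [(s, lst)])
    []).map Prod.snd

-- ===== PRECONDITION & SPEC =====
-- Pre_ excludes exactly the inputs containing an empty inner list, on which A raises
-- ValueError (min() of an empty generator inside normalize).
def Pre_eliminate_cyclic_permutations (lists : List (List Int)) : Prop :=
  ∀ lst ∈ lists, lst ≠ []
instance (lists : List (List Int)) : Decidable (Pre_eliminate_cyclic_permutations lists) := by
  unfold Pre_eliminate_cyclic_permutations; infer_instance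

def pvWitness_eliminate_cyclic_permutations : List (List Int) := [[1, 2], [2, 1], [1, 2, 1]]

def Spec_eliminate_cyclic_permutations (lists : List (List Int)) (out : List (List Int)) : Prop := out = eliminate_cyclic_permutations_alt lists
instance (lists : List (List Int)) (out : List (List Int)) : Decidable (Spec_eliminate_cyclic_permutations lists out) := by unfold Spec_eliminate_cyclic_permutations; infer_instance

-- ===== CLAIM (what is proved, stated in full; the proofs are below) =====
def Claim_equal_eliminate_cyclic_permutations : Prop := ∀ (lists : List (List Int)), Dom_eliminate_cyclic_permutations lists → Pre_eliminate_cyclic_permutations lists → Spec_eliminate_cyclic_permutations lists (eliminate_cyclic_permutations lists)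

-- ===== LEMMAS AND PROOFS =====

def pvRot (lst : List Int) (k : Nat) : List Int := lst.drop k ++ lst.take k

lemma pvRot_take_drop {lst : List Int} {k : Nat} (hk : k ≤ lst.length) :
    ((lst ++ lst).drop k).take lst.length = pvRot lst k := by
  rw [List.drop_append_of_le_length hk, List.take_append]
  rw [List.take_of_length_le (by simp)]
  simp [pvRot]
  omega

lemma pvRot_eq_rotate {lst : List Int} {k : Nat} (hk : k ≤ lst.length) :
    pvRot lst k = lst.rotate k := by
  rw [List.rotate_eq_drop_append_take hk]; rfl

def pvRots (lst : List Int) : List (List Int) := (List.range lst.length).map (pvRot lst)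

def pvIsMin (R : List (List Int)) (v : List Int) : Prop := v ∈ R ∧ ∀ y ∈ R, v ≤ y

lemma pvMem_rots {lst : List Int} (h : lst ≠ []) (v : List Int) :
    v ∈ pvRots lst ↔ lst.IsRotated v := by
  constructor
  · rintro hv
    obtain ⟨k, hk, rfl⟩ := List.mem_map.mp hv
    exact ⟨k, (pvRot_eq_rotate (le_of_lt (List.mem_range.mp hk))).symm⟩
  · rintro ⟨n, rfl⟩
    have hl : 0 < lst.length := List.length_pos_iff.mpr h
    refine List.mem_map.mpr ⟨n % lst.length, List.mem_range.mpr (Nat.mod_lt _ hl), ?_⟩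
    rw [pvRot_eq_rotate (le_of_lt (Nat.mod_lt _ hl)), List.rotate_mod]

lemma pvRots_ne_nil {lst : List Int} (h : lst ≠ []) : pvRots lst ≠ [] := by
  simp [pvRots, List.range_eq_nil, h]

lemma pvNormalize_isMin {lst : List Int} (h : lst ≠ []) :
    pvIsMin (pvRots lst) (pvNormalize lst) := by
  have hmap : (PySem.List.pyRange 0 (PySem.List.len lst) 1).map
      (fun i => PySem.List.slice lst (some i) none ++ PySem.List.slice lst none (some i))
      = pvRots lst := by
    rw [PySem.List.len_eq, PySem.List.pyRange_zero_natCast, List.map_map]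
    exact List.map_congr_left fun k hk => by
      simp only [Function.comp_apply, PySem.List.slice_from_natCast, PySem.List.slice_to_natCast]
      rfl
  unfold pvNormalize
  rw [hmap]
  cases hmin : PySem.List.min? (pvRots lst) (fun x => x) with
  | none => exact absurd ((PySem.List.min?_eq_none_iff _ _).mp hmin) (pvRots_ne_nil h)
  | some v =>
    simp only [Option.getD_some]
    have hmin' : (@PySem.List.min? (List Int) (List Int) List.instLinearOrder.toLT
        LinearOrder.toDecidableLT (pvRots lst) (fun x => x)) = some v := by
      convert hmin using 2
    exact ⟨PySem.List.min?_mem hmin, fun y hy => PySem.List.min?_isMin (key := fun x => x) hmin' y hy⟩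

lemma pvIsMin_congr {R R' : List (List Int)} {v w : List Int}
    (hmem : ∀ z, z ∈ R ↔ z ∈ R') (hv : pvIsMin R v) (hw : pvIsMin R' w) : v = w :=
  le_antisymm (hv.2 w ((hmem w).mpr hw.1)) (hw.2 v ((hmem v).mp hv.1))

lemma pvNormalize_rot {x : List Int} (h : x ≠ []) : x.IsRotated (pvNormalize x) :=
  (pvMem_rots h _).mp (pvNormalize_isMin h).1

lemma pvNormalize_invariant {x y : List Int} (hx : x ≠ []) (hrot : x.IsRotated y) :
    pvNormalize x = pvNormalize y := by
  have hy : y ≠ [] := by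
    intro he; subst he
    exact hx (List.length_eq_zero_iff.mp (hrot.perm.length_eq.trans rfl))
  refine pvIsMin_congr (fun z => ?_) (pvNormalize_isMin hx) (pvNormalize_isMin hy)
  rw [pvMem_rots hx, pvMem_rots hy]
  exact ⟨fun h => (hrot.symm).trans h, fun h => hrot.trans h⟩

lemma pvNormalize_eq_iff {x y : List Int} (hx : x ≠ []) (hy : y ≠ []) :
    pvNormalize x = pvNormalize y ↔ x.IsRotated y := by
  constructor
  · intro he
    exact (pvNormalize_rot hx).trans (he ▸ (pvNormalize_rot hy).symm)
  · exact pvNormalize_invariant hx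

lemma pvIsRotation_iff {a b : List Int} (ha : a ≠ []) :
    pvIsRotation a b = true ↔ a.IsRotated b := by
  unfold pvIsRotation
  by_cases hlen : a.length = b.length
  · simp only [PySem.List.len_eq, hlen, ne_eq, not_true_eq_false, if_false]
    simp only [← hlen]
    rw [PySem.List.pyRange_zero_natCast]
    rw [List.any_map, List.any_eq_true]
    constructor
    · rintro ⟨k, hk, hslice⟩
      have hk' := List.mem_range.mp hk
      simp only [Function.comp_apply, PySem.List.slice_natCast_add,
        pvRot_take_drop (le_of_lt hk'), beq_iff_eq] at hslice
      exact ⟨k, by rw [← pvRot_eq_rotate (le_of_lt hk'), hslice]⟩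
    · intro hrot
      obtain ⟨k, hk, hv⟩ := List.mem_map.mp ((pvMem_rots ha b).mpr hrot)
      refine ⟨k, hk, ?_⟩
      have hk' := List.mem_range.mp hk
      simp only [Function.comp_apply, PySem.List.slice_natCast_add,
        pvRot_take_drop (le_of_lt hk'), beq_iff_eq]
      exact hv
  · simp only [PySem.List.len_eq, Nat.cast_inj, hlen, ne_eq, not_false_eq_true, if_true,
      Bool.false_eq_true]
    exact ⟨fun h => absurd h (by simp), fun h => absurd h.perm.length_eq hlen⟩

-- guard equivalence: A's set test and B's pairwise test decide the same thing
lemma pvGuard_iff {r lst : List Int} (hr : r ≠ []) (hl : lst ≠ []) :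
    pvNormalize r = pvNormalize lst ↔ ((r.sum == lst.sum) && pvIsRotation r lst) = true := by
  rw [pvNormalize_eq_iff hr hl, Bool.and_eq_true, beq_iff_eq]
  constructor
  · intro h; exact ⟨h.perm.sum_eq, (pvIsRotation_iff hr).mpr h⟩
  · rintro ⟨-, h⟩; exact (pvIsRotation_iff hr).mp h

-- the fold invariant: A's (set-of-norms, output) state corresponds to B's kept list
lemma pvFold_corr (rest : List (List Int)) (hne : ∀ l ∈ rest, l ≠ []) :
    ∀ (S : PySem.Set (List Int)) (out : List (List Int)) (kept : List (Int × List Int)),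
    out = kept.map Prod.snd →
    (∀ p ∈ kept, p.1 = p.2.sum ∧ p.2 ≠ []) →
    (∀ v, PySem.Set.contains S v = true ↔ ∃ p ∈ kept, pvNormalize p.2 = v) →
    (rest.foldl
      (fun (st : PySem.Set (List Int) × List (List Int)) lst =>
        let norm := pvNormalize lst
        if PySem.Set.contains st.1 norm then st
        else (PySem.Set.add st.1 norm, st.2 ++ [lst]))
      (S, out)).2
    = (rest.foldl
        (fun (kept : List (Int × List Int)) lst =>
          let s : Int := lst.sum
          if kept.any (fun p => p.1 == s && pvIsRotation p.2 lst) then kept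
          else kept ++ [(s, lst)])
        kept).map Prod.snd := by
  induction rest with
  | nil => intro S out kept hout _ _; simpa using hout
  | cons lst rest ih =>
    intro S out kept hout hkept hS
    have hl : lst ≠ [] := hne lst (by simp)
    have hrest : ∀ l ∈ rest, l ≠ [] := fun l hlm => hne l (by simp [hlm])
    have hcond : PySem.Set.contains S (pvNormalize lst)
        = kept.any (fun p => p.1 == lst.sum && pvIsRotation p.2 lst) := by
      by_cases hc : ∃ p ∈ kept, pvNormalize p.2 = pvNormalize lst
      · obtain ⟨p, hp, hpe⟩ := hc
        have h1 : PySem.Set.contains S (pvNormalize lst) = true := (hS _).mpr ⟨p, hp, hpe⟩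
        have h2 : kept.any (fun p => p.1 == lst.sum && pvIsRotation p.2 lst) = true := by
          refine List.any_eq_true.mpr ⟨p, hp, ?_⟩
          rw [(hkept p hp).1]
          exact (pvGuard_iff (hkept p hp).2 hl).mp hpe
        rw [h1, h2]
      · have h1 : PySem.Set.contains S (pvNormalize lst) = false := by
          rw [Bool.eq_false_iff]; intro h; exact hc ((hS _).mp h)
        have h2 : kept.any (fun p => p.1 == lst.sum && pvIsRotation p.2 lst) = false := by
          rw [Bool.eq_false_iff]; intro h
          obtain ⟨p, hp, hpe⟩ := List.any_eq_true.mp h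
          rw [(hkept p hp).1] at hpe
          exact hc ⟨p, hp, (pvGuard_iff (hkept p hp).2 hl).mpr hpe⟩
        rw [h1, h2]
    simp only [List.foldl_cons]
    by_cases hc : PySem.Set.contains S (pvNormalize lst) = true
    · rw [hc] at hcond
      simp only [hc, ← hcond, if_true]
      exact ih hrest S out kept hout hkept hS
    · have hc' : PySem.Set.contains S (pvNormalize lst) = false := by simpa using hc
      rw [hc'] at hcond
      simp only [hc', ← hcond, Bool.false_eq_true, if_false]
      refine ih hrest _ _ (kept ++ [(lst.sum, lst)]) (by simp [hout]) ?_ ?_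
      · intro p hp
        rcases List.mem_append.mp hp with hp | hp
        · exact hkept p hp
        · simp at hp; subst hp; exact ⟨rfl, hl⟩
      · intro v
        rw [PySem.Set.contains_iff, PySem.Set.mem_add, ← PySem.Set.contains_iff, hS v]
        constructor
        · rintro (⟨p, hp, hpe⟩ | rfl)
          · exact ⟨p, List.mem_append.mpr (Or.inl hp), hpe⟩
          · exact ⟨(lst.sum, lst), by simp, rfl⟩
        · rintro ⟨p, hp, hpe⟩
          rcases List.mem_append.mp hp with hp | hp
          · exact Or.inl ⟨p, hp, hpe⟩
          · simp at hp; subst hp; exact Or.inr hpe.symm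

-- ===== VERDICT (by name: the statement is the Claim_ definition above) =====
theorem eliminate_cyclic_permutations_spec : Claim_equal_eliminate_cyclic_permutations := by
  intro lists _ hpre
  unfold Spec_eliminate_cyclic_permutations
  unfold eliminate_cyclic_permutations eliminate_cyclic_permutations_alt
  exact pvFold_corr lists hpre PySem.Set.empty [] [] rfl (by simp)
    (fun v => by simp [PySem.Set.empty])
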